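-- pv_equiv track=rewrite | github.com/mikanup/CS61A | Lab/lab01/lab01.py | double_eights
-- ===== SOURCE A (Python) =====
-- def double_eights(n):
--     """Return true if n has two eights in a row.
--     >>> double_eights(8)
--     False
--     >>> double_eights(88)
--     True
--     >>> double_eights(2882)
--     True
--     >>> double_eights(880088)
--     True
--     >>> double_eights(12345)
--     False
--     >>> double_eights(80808080)
--     False
--     """
--     "*** YOUR CODE HERE ***"
--     # while n > 0:
--     #     digit = n % 10
--     #     if digit == 8:
--     #         n = n // 10
--     #         digit = n % 10
--     #         if digit == 8:
--     #             return True
--     #         else: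
--     #             n = n // 10
--     #             continue
--     #     else:
--     #         n = n // 10
--     # return False
--     # 在做lab04的时候，找出之前做的，总觉得不精简，找chatgpt改了一下
--     pre_digit = 0
--     while n > 0:
--         digit = n % 10
--         if digit == 8 and pre_digit == 8:
--             return True
--         pre_digit = digit
--         n = n // 10
--     return False
-- ===== SOURCE B (Python) =====
-- def double_eights(n):
--     return n > 0 and '88' in str(n)
-- ===== Notes on version B (the rewrite author's own statement) =====
-- stated objective: idiomatic
-- what changed: Replaces the digit-peeling loop with a remembered previous digit by a single substring-membership test '88' in str(n), guarded by n > 0 to match A's behaviour on non-positive inputs.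
import Mathlib
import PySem

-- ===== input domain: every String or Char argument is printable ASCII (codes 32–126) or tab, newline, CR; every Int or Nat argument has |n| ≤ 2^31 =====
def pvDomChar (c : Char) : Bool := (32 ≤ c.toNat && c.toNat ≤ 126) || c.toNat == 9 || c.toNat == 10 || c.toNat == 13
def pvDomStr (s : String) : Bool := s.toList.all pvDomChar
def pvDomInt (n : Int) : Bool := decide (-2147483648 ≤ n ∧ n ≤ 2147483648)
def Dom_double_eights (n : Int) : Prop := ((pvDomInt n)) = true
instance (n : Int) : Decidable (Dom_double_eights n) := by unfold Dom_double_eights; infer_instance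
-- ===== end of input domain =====

-- B replaces A's digit-peeling loop (remembered previous digit) by the substring test '88' in str(n), guarded by n > 0.


-- ===== PORT A =====
-- the while-loop: state (pre_digit, n)
def pvALoop (pre n : Int) : Bool :=
  if _h : 0 < n then
    let digit := PySem.Int.mod n 10
    if digit == 8 && pre == 8 then true
    else pvALoop digit (PySem.Int.floordiv n 10)
  else false
termination_by n.toNat
decreasing_by
  simp only [PySem.Int.floordiv_eq_ediv_of_pos (by norm_num : (0:Int) < 10)]
  omega

def double_eights (n : Int) : Bool := pvALoop 0 n

-- ===== PORT B =====
def double_eights_alt (n : Int) : Bool :=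
  decide (0 < n) && PySem.Str.isIn "88" (PySem.Int.toStr n)

-- ===== PRECONDITION & SPEC =====
def Spec_double_eights (n : Int) (out : Bool) : Prop := out = double_eights_alt n
instance (n : Int) (out : Bool) : Decidable (Spec_double_eights n out) := by unfold Spec_double_eights; infer_instance

-- ===== CLAIM (what is proved, stated in full; the proofs are below) =====
def Claim_equal_double_eights : Prop := ∀ (n : Int), Dom_double_eights n → Spec_double_eights n (double_eights n)

-- ===== LEMMAS AND PROOFS =====

-- A's loop expressed over the little-endian digit list
def pvHasPair (pre : Nat) (ds : List Nat) : Bool :=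
  match ds with
  | [] => false
  | d :: rest => if d = 8 ∧ pre = 8 then true else pvHasPair d rest

-- "two consecutive 8s occur in the list"
def pvPairIn : List Nat → Bool
  | [] => false
  | [_] => false
  | a :: b :: rest => (a == 8 && b == 8) || pvPairIn (b :: rest)

theorem pvALoop_eq_hasPair (m : Nat) (pre : Nat) :
    pvALoop (pre : Int) ((m : Nat) : Int) = pvHasPair pre (Nat.digits 10 m) := by
  induction m using Nat.strong_induction_on generalizing pre with
  | _ m ih =>
    by_cases hm : 0 < m
    · rw [pvALoop]
      rw [dif_pos (by exact_mod_cast hm)]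
      rw [PySem.Int.mod_eq_emod_of_pos (by norm_num), PySem.Int.floordiv_eq_ediv_of_pos (by norm_num)]
      have hmod : ((m : Int)) % 10 = ((m % 10 : Nat) : Int) := by push_cast; ring
      have hdiv : ((m : Int)) / 10 = ((m / 10 : Nat) : Int) := by push_cast; ring
      rw [Nat.digits_def' (by norm_num : 1 < 10) hm, pvHasPair]
      simp only [hmod, hdiv]
      by_cases h8 : m % 10 = 8 ∧ pre = 8
      · rw [if_pos (by simp [h8.1, h8.2]), if_pos h8]
      · rw [if_neg (by
          simp only [Bool.and_eq_true, beq_iff_eq]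
          intro hc
          exact h8 ⟨by exact_mod_cast hc.1, by exact_mod_cast hc.2⟩), if_neg h8]
        exact ih (m / 10) (Nat.div_lt_self hm (by norm_num)) (m % 10)
    · have hm0 : m = 0 := by omega
      subst hm0
      rw [pvALoop]
      simp [pvHasPair]

theorem pvHasPair_eq (ds : List Nat) (pre : Nat) :
    pvHasPair pre ds = (((pre == 8) && (ds.head? == some 8)) || pvPairIn ds) := by
  induction ds generalizing pre with
  | nil => simp [pvHasPair, pvPairIn]
  | cons d rest ih =>
    rw [pvHasPair, ih]
    cases rest with
    | nil =>
      by_cases hd : d = 8 <;> by_cases hp : pre = 8 <;>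
        simp [pvPairIn, hd, hp]
    | cons e rs =>
      by_cases hd : d = 8 <;> by_cases hp : pre = 8 <;> by_cases he : e = 8 <;>
        simp [pvPairIn, hd, hp, he]

theorem pvDigitChar_eq_eight {d : Nat} (hd : d < 10) :
    Nat.digitChar d = '8' ↔ d = 8 := by
  interval_cases d <;> simp [Nat.digitChar]

theorem pvPairIn_iff_infix (ds : List Nat) (h : ∀ d ∈ ds, d < 10) :
    pvPairIn ds = true ↔ ['8', '8'] <:+: ds.map Nat.digitChar := by
  match ds with
  | [] => simp [pvPairIn]
  | [a] =>
    simp only [pvPairIn, List.map]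
    constructor
    · intro hc; cases hc
    · intro hinf
      have := hinf.length_le
      simp at this
  | a :: b :: rest =>
    have ha : a < 10 := h a (by simp)
    have hb : b < 10 := h b (by simp)
    rw [pvPairIn]
    have ihr := pvPairIn_iff_infix (b :: rest) (fun d hd => h d (List.mem_cons_of_mem a hd))
    simp only [Bool.or_eq_true, Bool.and_eq_true, beq_iff_eq, List.map_cons]
    rw [List.map_cons] at ihr
    constructor
    · rintro (⟨ha8, hb8⟩ | hr)
      · have hp : (['8','8'] : List Char) <+: a.digitChar :: b.digitChar :: List.map Nat.digitChar rest := by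
          rw [(pvDigitChar_eq_eight ha).mpr ha8, (pvDigitChar_eq_eight hb).mpr hb8]
          exact ⟨List.map Nat.digitChar rest, rfl⟩
        exact hp.isInfix
      · exact (ihr.mp hr).trans (List.suffix_cons a.digitChar _).isInfix
    · intro hyp
      rw [List.infix_cons_iff] at hyp
      rcases hyp with hpre | hinf
      · rw [List.cons_prefix_cons] at hpre
        obtain ⟨h1, h2⟩ := hpre
        rw [List.cons_prefix_cons] at h2
        exact Or.inl ⟨(pvDigitChar_eq_eight ha).mp h1.symm, (pvDigitChar_eq_eight hb).mp h2.1.symm⟩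
      · exact Or.inr (ihr.mpr hinf)

theorem pvToDigitsCore_eq (f : Nat) : ∀ (n : Nat) (l : List Char), 0 < n → n ≤ f →
    Nat.toDigitsCore 10 f n l = ((Nat.digits 10 n).map Nat.digitChar).reverse ++ l := by
  induction f with
  | zero => intro n l h0 hf; omega
  | succ f ih =>
    intro n l h0 hf
    rw [Nat.toDigitsCore]
    rw [Nat.digits_def' (by norm_num : 1 < 10) h0]
    by_cases hq : n / 10 = 0
    · simp [hq]
    · rw [if_neg hq]
      rw [ih (n / 10) _ (by omega) (by
        have := Nat.div_lt_self h0 (by norm_num : 1 < 10)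
        omega)]
      simp

theorem pvToChars_pos (n : Int) (h : 0 < n) :
    PySem.Int.toChars n = ((Nat.digits 10 n.toNat).map Nat.digitChar).reverse := by
  have hneg : ¬ n < 0 := by omega
  simp only [PySem.Int.toChars, if_neg hneg, Nat.toDigits]
  rw [pvToDigitsCore_eq (n.toNat + 1) n.toNat [] (by omega) (by omega)]
  simp

-- ===== VERDICT (by name: the statement is the Claim_ definition above) =====
theorem double_eights_spec : Claim_equal_double_eights := by
  intro n _
  unfold Spec_double_eights double_eights double_eights_alt
  by_cases h : 0 < n
  · have hm : ((n.toNat : Nat) : Int) = n := by omega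
    have hA := pvALoop_eq_hasPair n.toNat 0
    rw [pvHasPair_eq] at hA
    simp only [Nat.cast_zero] at hA
    rw [hm] at hA
    simp only [show ((0:Nat) == 8) = false by decide, Bool.false_and, Bool.false_or] at hA
    rw [hA]
    rw [decide_eq_true h, Bool.true_and]
    have hdig : ∀ d ∈ Nat.digits 10 n.toNat, d < 10 :=
      fun d hd => Nat.digits_lt_base (by norm_num) hd
    rw [Bool.eq_iff_iff]
    rw [pvPairIn_iff_infix _ hdig]
    rw [PySem.Str.isIn_iff_infix]
    rw [PySem.Int.toList_toStr, pvToChars_pos n h]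
    have h88 : ("88" : String).toList = ['8', '8'] := by decide
    rw [h88]
    constructor
    · intro hi
      have h2 : (['8','8'] : List Char).reverse <:+: ((Nat.digits 10 n.toNat).map Nat.digitChar).reverse :=
        List.reverse_infix.mpr hi
      simpa using h2
    · intro hi
      have h2 : (['8','8'] : List Char).reverse <:+: ((Nat.digits 10 n.toNat).map Nat.digitChar).reverse := by
        simpa using hi
      simpa using List.reverse_infix.mp h2
  · rw [pvALoop, dif_neg h]
    simp [h]
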